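-- pv_equiv track=rewrite | github.com/pgadmin-org/pgadmin4 | web/pgadmin/tools/sqleditor/utils/is_query_resultset_updatable.py | _check_single_table
-- ===== SOURCE A (Python) =====
-- def _check_single_table(columns_info):
--     table_oid = None
--     for column in columns_info:
--         # Skip columns that are not directly from tables
--         if column['table_oid'] is None:
--             continue
--         # If we don't have a table_oid yet, store this one
--         if table_oid is None:
--             table_oid = column['table_oid']
--         # If we already have one, check that all the columns have the same one
--         elif column['table_oid'] != table_oid:
--             return None
--     return table_oid
-- ===== SOURCE B (Python) =====
-- def _check_single_table(columns_info):
--     distinct = {c['table_oid'] for c in columns_info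
--                 if c['table_oid'] is not None}
--     if len(distinct) == 1:
--         return next(iter(distinct))
--     return None
-- ===== Notes on version B (the rewrite author's own statement) =====
-- stated objective: simpler
-- what changed: Replaces the running-scalar loop with early return by a one-pass set comprehension of the distinct non-None table_oids followed by a size check.
-- outside the precondition, e.g. on _check_single_table([{'table_oid': 1}, {'table_oid': 2}, {}]): A returns None, B raises KeyError
import Mathlib
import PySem

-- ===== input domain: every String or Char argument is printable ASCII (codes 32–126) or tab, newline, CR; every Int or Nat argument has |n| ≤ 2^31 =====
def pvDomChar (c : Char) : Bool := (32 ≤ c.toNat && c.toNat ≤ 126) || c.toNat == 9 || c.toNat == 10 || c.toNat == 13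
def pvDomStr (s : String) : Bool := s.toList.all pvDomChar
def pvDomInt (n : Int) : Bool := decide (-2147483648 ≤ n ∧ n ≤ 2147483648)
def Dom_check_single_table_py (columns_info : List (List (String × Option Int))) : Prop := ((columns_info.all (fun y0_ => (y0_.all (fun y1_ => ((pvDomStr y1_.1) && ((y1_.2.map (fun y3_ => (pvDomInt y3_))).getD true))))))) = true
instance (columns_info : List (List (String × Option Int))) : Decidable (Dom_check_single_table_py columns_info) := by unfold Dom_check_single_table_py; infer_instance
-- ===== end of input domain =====

-- B replaces A's running scalar + early-return loop by collecting the set of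
-- distinct non-None table_oids in one pass and deciding from its size (objective: simpler).

-- ===== PORT A =====
-- loop over the columns carrying the running 'table_oid' scalar, early return on mismatch
def pvALoop : List (List (String × Option Int)) → Option Int → Option Int
  | [], table_oid => table_oid
  | column :: rest, table_oid =>
    match PySem.Dict.get? (PySem.Dict.mk column) "table_oid" with
    | none => none          -- KeyError in Python; excluded by Pre_
    | some none => pvALoop rest table_oid     -- continue
    | some (some v) =>
      match table_oid with
      | none => pvALoop rest (some v)
      | some t => if v ≠ t then none else pvALoop rest (some t)

def check_single_table_py (columns_info : List (List (String × Option Int))) : Option Int :=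
  pvALoop columns_info none

-- ===== PORT B =====
def check_single_table_py_alt (columns_info : List (List (String × Option Int))) : Option Int :=
  let distinct : PySem.Set Int :=
    PySem.Set.ofList (columns_info.filterMap
      (fun c => (PySem.Dict.get? (PySem.Dict.mk c) "table_oid").bind id))
  if distinct.length = 1 then distinct.head? else none

-- ===== PRECONDITION & SPEC =====
-- Pre_ excludes columns lacking the key 'table_oid' (Python KeyError). A can still return
-- None on such inputs when a mismatch of two oids occurs before the bad column (its early
-- return never reaches it); B scans every column and raises KeyError there, so those
-- inputs are excluded too.
def Pre_check_single_table_py (columns_info : List (List (String × Option Int))) : Prop :=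
  columns_info.all (fun c => (PySem.Dict.get? (PySem.Dict.mk c) "table_oid").isSome) = true
instance (columns_info : List (List (String × Option Int))) : Decidable (Pre_check_single_table_py columns_info) := by unfold Pre_check_single_table_py; infer_instance
def pvWitness_check_single_table_py : (List (List (String × Option Int))) :=
  [[("table_oid", some 5)], [("table_oid", none)], [("table_oid", some 5)]]
def Spec_check_single_table_py (columns_info : List (List (String × Option Int))) (out : Option Int) : Prop := out = check_single_table_py_alt columns_info
instance (columns_info : List (List (String × Option Int))) (out : Option Int) : Decidable (Spec_check_single_table_py columns_info out) := by unfold Spec_check_single_table_py; infer_instance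

-- ===== CLAIM (what is proved, stated in full; the proofs are below) =====
def Claim_equal_check_single_table_py : Prop := ∀ (columns_info : List (List (String × Option Int))), Dom_check_single_table_py columns_info → Pre_check_single_table_py columns_info → Spec_check_single_table_py columns_info (check_single_table_py columns_info)

-- ===== LEMMAS AND PROOFS =====

-- the list of non-None oids looked up in order
def pvOids (columns_info : List (List (String × Option Int))) : List Int :=
  columns_info.filterMap (fun c => (PySem.Dict.get? (PySem.Dict.mk c) "table_oid").bind id)

-- reference value of both programs in terms of pvOids
def pvRef : List Int → Option Int
  | [] => none
  | v :: rest => if rest.all (· == v) then some v else none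

lemma pvALoop_some (cs : List (List (String × Option Int))) (t : Int)
    (hpre : ∀ c ∈ cs, (PySem.Dict.get? (PySem.Dict.mk c) "table_oid").isSome) :
    pvALoop cs (some t) = if (pvOids cs).all (· == t) then some t else none := by
  induction cs with
  | nil => simp [pvALoop, pvOids]
  | cons c rest ih =>
    have hc := hpre c (by simp)
    have hrest : ∀ c' ∈ rest, (PySem.Dict.get? (PySem.Dict.mk c') "table_oid").isSome :=
      fun c' h => hpre c' (by simp [h])
    cases hg : PySem.Dict.get? (PySem.Dict.mk c) "table_oid" with
    | none => simp [hg] at hc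
    | some o =>
      cases o with
      | none => simp [pvALoop, hg, pvOids, ih hrest]
      | some v =>
        by_cases hv : v = t
        · subst hv
          simp [pvALoop, hg, pvOids, ih hrest]
        · simp [pvALoop, hg, pvOids, hv]

lemma pvALoop_ref (cs : List (List (String × Option Int)))
    (hpre : ∀ c ∈ cs, (PySem.Dict.get? (PySem.Dict.mk c) "table_oid").isSome) :
    pvALoop cs none = pvRef (pvOids cs) := by
  induction cs with
  | nil => simp [pvALoop, pvOids, pvRef]
  | cons c rest ih =>
    have hc := hpre c (by simp)
    have hrest : ∀ c' ∈ rest, (PySem.Dict.get? (PySem.Dict.mk c') "table_oid").isSome :=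
      fun c' h => hpre c' (by simp [h])
    cases hg : PySem.Dict.get? (PySem.Dict.mk c) "table_oid" with
    | none => simp [hg] at hc
    | some o =>
      cases o with
      | none => simp [pvALoop, hg, pvOids, ih hrest]
      | some v =>
        simp [pvALoop, hg, pvOids, pvRef,
          pvALoop_some rest v hrest]

lemma pvSet_singleton_ref (l : List Int) :
    (if (PySem.Set.ofList l).length = 1 then (PySem.Set.ofList l).head? else none)
      = pvRef l := by
  cases l with
  | nil => simp [pvRef]
  | cons v rest =>
    rw [PySem.Set.ofList_cons]
    by_cases h : rest.all (· == v)
    · have : ((PySem.Set.ofList rest).discard v) = [] := by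
        rw [List.eq_nil_iff_forall_not_mem]
        intro x hx
        rw [PySem.Set.mem_discard] at hx
        rcases hx with ⟨hmem, hne⟩
        rw [PySem.Set.mem_ofList] at hmem
        exact hne (by simpa using (List.all_eq_true.mp h x hmem))
      simp [this, pvRef, h]
    · have hx : ∃ x ∈ rest, x ≠ v := by
        by_contra hcon
        push_neg at hcon
        exact h (List.all_eq_true.mpr (fun x hm => by simpa using hcon x hm))
      rcases hx with ⟨x, hmem, hne⟩
      have hmem' : x ∈ (PySem.Set.ofList rest).discard v := by
        rw [PySem.Set.mem_discard, PySem.Set.mem_ofList]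
        exact ⟨hmem, hne⟩
      have hne' : (PySem.Set.ofList rest).discard v ≠ [] :=
        fun he => by simp [he] at hmem'
      simp [pvRef, h, hne']

-- ===== VERDICT (by name: the statement is the Claim_ definition above) =====
theorem check_single_table_py_spec : Claim_equal_check_single_table_py := by
  intro cs _ hpre
  have hpre' : ∀ c ∈ cs, (PySem.Dict.get? (PySem.Dict.mk c) "table_oid").isSome := by
    intro c hc
    have := List.all_eq_true.mp hpre c hc
    simpa using this
  show check_single_table_py cs = check_single_table_py_alt cs
  unfold check_single_table_py check_single_table_py_alt
  rw [pvALoop_ref cs hpre']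
  exact (pvSet_singleton_ref (pvOids cs)).symm
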